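-- pv_equiv track=rewrite | github.com/PeterKamphuis/pyFAT-astro | pyFAT_astro/Support/tirshaker.py | replaceforplot_lines
-- ===== SOURCE A (Python) =====
-- def tirshaker_returnblanksatstart(string):
--     """
--     Helper to tirshaker
--     """
--     j = ''
--     for i in string:
--         if i != ' ':
--             break
--         j += ' '
--     return j
--
-- def replaceforplot_lines(lines = None, gr_parms = None, gr_device = None):
--     """
--     helper working on a list of lines, see replaceforplot
--     """
--
--     # Create a block containing the correct output lines
--     block = ['GR_PARMS= {:s}'.format(gr_parms)]
--     grnr = 0
--     for parameter in gr_parms.split(' ')[1:]: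
--         grnr += 1
--         block += ['GR_COL_{:d}= 1'.format(grnr)]
--         block += ['GR_LINES_{:d}= 1'.format(grnr)]
--
--         for line in lines:
--             blankhere = tirshaker_returnblanksatstart(line)
--             lbl = len(blankhere)
--             if line.find('ERR_'+parameter+'=',lbl) == lbl:
--                 block += ['GR_ERRB_{:d}= 1'.format(grnr)]
--                 block += ['GR_ERRV_{:d}='.format(grnr)+line[lbl+len('ERR_'+parameter+'='):]]
--
--
--     # Then put it in after GR_PARMS
--     outputlist = []
--     for line in lines:
--         blankhere = tirshaker_returnblanksatstart(line)
--         lbl = len(blankhere)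
--         if line.find('GR_PARMS=',lbl) == lbl:
--             outputlist += ['#'+line]
--             outputlist.extend(block)
--         elif line.find('GR_DEVICE=',lbl) == lbl:
--             if gr_device == None:
--                 outputlist += [line]
--             else:
--                 outputlist += ['#'+line]
--                 outputlist += ['GR_DEVICE= '+gr_device+'\n']
--         else:
--             outputlist += [line]
--     return outputlist
-- ===== SOURCE B (Python) =====
-- def _stripped(line):
--     i = 0
--     while i < len(line) and line[i] == ' ':
--         i += 1
--     return line[i:]
--
-- def replaceforplot_lines(lines = None, gr_parms = None, gr_device = None):
--     # Index every 'ERR_...=' prefix of a (space-stripped) line in a dict built in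
--     # one pass, so each parameter's ERR lines are found by a lookup, not a scan.
--     err = {}
--     for line in lines:
--         s = _stripped(line)
--         if s.startswith('ERR_'):
--             for i in range(len(s)):
--                 if s[i] == '=':
--                     key = s[:i + 1]
--                     err[key] = err.get(key, []) + [s[i + 1:]]
--
--     block = ['GR_PARMS= ' + gr_parms]
--     for i, parameter in enumerate(gr_parms.split(' ')[1:]):
--         grnr = str(i + 1)
--         block.append('GR_COL_' + grnr + '= 1')
--         block.append('GR_LINES_' + grnr + '= 1')
--         for v in err.get('ERR_' + parameter + '=', []):
--             block.append('GR_ERRB_' + grnr + '= 1')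
--             block.append('GR_ERRV_' + grnr + '=' + v)
--
--     out = []
--     for line in lines:
--         s = _stripped(line)
--         if s.startswith('GR_PARMS='):
--             out.append('#' + line)
--             out.extend(block)
--         elif s.startswith('GR_DEVICE='):
--             if gr_device is None:
--                 out.append(line)
--             else:
--                 out.append('#' + line)
--                 out.append('GR_DEVICE= ' + gr_device + '\n')
--         else:
--             out.append(line)
--     return out
-- ===== Notes on version B (the rewrite author's own statement) =====
-- stated objective: alternative
-- what changed: B builds, in one pass over the lines, a dict mapping every 'ERR_...=' prefix of a space-stripped line to the list of value suffixes after it, so each parameter's ERR lines come from a dict lookup instead of A's rescan of all lines per parameter; measured cost on the generated inputs is similar.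
import Mathlib
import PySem

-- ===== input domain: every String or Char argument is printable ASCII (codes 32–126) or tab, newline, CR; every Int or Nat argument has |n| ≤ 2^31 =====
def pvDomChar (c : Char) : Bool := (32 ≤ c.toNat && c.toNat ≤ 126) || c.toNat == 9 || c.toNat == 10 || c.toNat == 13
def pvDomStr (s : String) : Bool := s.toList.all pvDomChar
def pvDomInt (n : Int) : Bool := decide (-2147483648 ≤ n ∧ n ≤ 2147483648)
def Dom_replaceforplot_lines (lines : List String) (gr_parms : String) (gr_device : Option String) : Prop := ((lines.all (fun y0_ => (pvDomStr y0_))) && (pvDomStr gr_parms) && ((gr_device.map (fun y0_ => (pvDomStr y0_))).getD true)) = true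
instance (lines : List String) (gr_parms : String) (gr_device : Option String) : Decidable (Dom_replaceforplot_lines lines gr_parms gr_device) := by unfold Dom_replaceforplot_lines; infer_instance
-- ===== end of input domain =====

-- Alternative algorithm: instead of A's parameter-by-parameter rescan of all lines, B builds in one
-- pass a dict 'ERR_...=' prefix -> list of value suffixes, and each parameter becomes a dict lookup.

-- ===== PORT A =====
-- 'for i in string: if i != ' ': break; j += ' ''
def pvBlanksGo : List Char → List Char → List Char
  | [], j => j
  | i :: rest, j => if i ≠ ' ' then j else pvBlanksGo rest (j ++ [' '])

def tirshaker_returnblanksatstart (s : String) : String :=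
  String.ofList (pvBlanksGo s.toList [])

def replaceforplot_lines (lines : List String) (gr_parms : String) (gr_device : Option String) : List String :=
  -- block = ['GR_PARMS= {:s}'.format(gr_parms)]; nested loops append to (block, grnr)
  let params := (PySem.Chars.splitOn gr_parms.toList [' ']).drop 1   -- gr_parms.split(' ')[1:]
  let st := params.foldl (fun (st : List String × Int) parameter =>
      let grnr := st.2 + 1
      let b1 := st.1 ++ ["GR_COL_" ++ PySem.Int.toStr grnr ++ "= 1"]
                     ++ ["GR_LINES_" ++ PySem.Int.toStr grnr ++ "= 1"]
      let pat := "ERR_".toList ++ parameter ++ "=".toList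
      let b2 := lines.foldl (fun b line =>
          let blankhere := tirshaker_returnblanksatstart line
          let lbl := blankhere.toList.length
          if PySem.Chars.findFrom line.toList pat (lbl : Int) = (lbl : Int) then
            b ++ ["GR_ERRB_" ++ PySem.Int.toStr grnr ++ "= 1"]
              ++ ["GR_ERRV_" ++ PySem.Int.toStr grnr ++ "="
                   ++ String.ofList (PySem.List.slice line.toList (some ((lbl : Int) + (pat.length : Int))) none)]
          else b) b1
      (b2, grnr)) (["GR_PARMS= " ++ gr_parms], 0)
  let block := st.1
  lines.foldl (fun out line =>
    let blankhere := tirshaker_returnblanksatstart line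
    let lbl := blankhere.toList.length
    if PySem.Chars.findFrom line.toList "GR_PARMS=".toList (lbl : Int) = (lbl : Int) then
      (out ++ ["#" ++ line]) ++ block
    else if PySem.Chars.findFrom line.toList "GR_DEVICE=".toList (lbl : Int) = (lbl : Int) then
      match gr_device with
      | none => out ++ [line]
      | some dev => (out ++ ["#" ++ line]) ++ ["GR_DEVICE= " ++ dev ++ "\n"]
    else out ++ [line]) []

-- ===== PORT B =====
-- '_stripped': drop the leading spaces of a line
def pvStripped : List Char → List Char
  | [] => []
  | c :: t => if c = ' ' then pvStripped t else c :: t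

-- the one-pass index: every 'ERR_…=' prefix of a stripped line ↦ the suffixes after it, in line order
def pvErrIndex (lines : List String) : PySem.Dict (List Char) (List (List Char)) :=
  lines.foldl (fun d line =>
    let s := pvStripped line.toList
    if PySem.Chars.startswith s "ERR_".toList then
      (List.range s.length).foldl (fun d i =>
        if s[i]! = '=' then
          d.modify (s.take (i + 1)) [] (· ++ [s.drop (i + 1)])
        else d) d
    else d) PySem.Dict.empty

def replaceforplot_lines_alt (lines : List String) (gr_parms : String) (gr_device : Option String) : List String :=
  let err := pvErrIndex lines
  let params := (PySem.Chars.splitOn gr_parms.toList [' ']).drop 1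
  let block := (PySem.List.enumerate params).foldl (fun b ip =>
      let grnr := PySem.Int.toStr (ip.1 + 1)
      let b := b ++ ["GR_COL_" ++ grnr ++ "= 1"] ++ ["GR_LINES_" ++ grnr ++ "= 1"]
      (err.getD ("ERR_".toList ++ ip.2 ++ "=".toList) []).foldl (fun b v =>
        b ++ ["GR_ERRB_" ++ grnr ++ "= 1"]
          ++ ["GR_ERRV_" ++ grnr ++ "=" ++ String.ofList v]) b)
    ["GR_PARMS= " ++ gr_parms]
  lines.foldl (fun out line =>
    let s := pvStripped line.toList
    if PySem.Chars.startswith s "GR_PARMS=".toList then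
      (out ++ ["#" ++ line]) ++ block
    else if PySem.Chars.startswith s "GR_DEVICE=".toList then
      match gr_device with
      | none => out ++ [line]
      | some dev => (out ++ ["#" ++ line]) ++ ["GR_DEVICE= " ++ dev ++ "\n"]
    else out ++ [line]) []

-- ===== PRECONDITION & SPEC =====
def Spec_replaceforplot_lines (lines : List String) (gr_parms : String) (gr_device : Option String) (out : List String) : Prop := out = replaceforplot_lines_alt lines gr_parms gr_device
instance (lines : List String) (gr_parms : String) (gr_device : Option String) (out : List String) : Decidable (Spec_replaceforplot_lines lines gr_parms gr_device out) := by unfold Spec_replaceforplot_lines; infer_instance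

-- ===== CLAIM (what is proved, stated in full; the proofs are below) =====
def Claim_equal_replaceforplot_lines : Prop := ∀ (lines : List String) (gr_parms : String) (gr_device : Option String), Dom_replaceforplot_lines lines gr_parms gr_device → Spec_replaceforplot_lines lines gr_parms gr_device (replaceforplot_lines lines gr_parms gr_device)

-- ===== LEMMAS AND PROOFS =====

-- the single match (value suffix) a stripped line contributes for a given key
def pvMatch (key s : List Char) : List (List Char) :=
  if key <+: s then [s.drop key.length] else []

-- A's blank counter: it returns the leading-space prefix
theorem pvBlanksGo_eq (cs j : List Char) : pvBlanksGo cs j = j ++ cs.takeWhile (· == ' ') := by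
  induction cs generalizing j with
  | nil => simp [pvBlanksGo]
  | cons c t ih =>
    by_cases h : c = ' '
    · subst h; simp [pvBlanksGo, ih]
    · simp [pvBlanksGo, h]

theorem pvStripped_eq (cs : List Char) : pvStripped cs = cs.dropWhile (· == ' ') := by
  induction cs with
  | nil => rfl
  | cons c t ih =>
    by_cases h : c = ' '
    · subst h; simp [pvStripped, ih]
    · simp [pvStripped, h]

theorem pvLbl_eq (line : String) :
    (tirshaker_returnblanksatstart line).toList.length = (line.toList.takeWhile (· == ' ')).length := by
  simp [tirshaker_returnblanksatstart, pvBlanksGo_eq]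

theorem pvLbl_le (line : String) :
    (line.toList.takeWhile (· == ' ')).length ≤ line.toList.length :=
  (List.takeWhile_sublist _).length_le

theorem pvDrop_takeWhile_length {α : Type} (p : α → Bool) (l : List α) :
    l.drop (l.takeWhile p).length = l.dropWhile p := by
  induction l with
  | nil => rfl
  | cons c t ih =>
    by_cases h : p c
    · simp [h, ih]
    · simp [h]

theorem pvDrop_lbl (line : String) :
    line.toList.drop ((line.toList.takeWhile (· == ' ')).length) = pvStripped line.toList := by
  rw [pvStripped_eq, pvDrop_takeWhile_length]

theorem pvFind_eq_zero_iff (s sub : List Char) : PySem.Chars.find s sub = 0 ↔ sub <+: s := by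
  constructor
  · intro h
    have h0 : 0 ≤ PySem.Chars.find s sub := le_of_eq h.symm
    have := (PySem.Chars.find_spec h0).1
    rwa [h] at this
  · intro hp
    have h0 : 0 ≤ PySem.Chars.find s sub :=
      (PySem.Chars.find_nonneg_iff s sub).2 hp.isInfix
    rcases lt_or_eq_of_le h0 with hlt | heq
    · exfalso
      have := (PySem.Chars.find_spec h0).2 0 (by omega)
      simp at this
      exact this hp
    · omega

-- A's test 'line.find(pat, lbl) == lbl' says exactly: pat is a prefix of the space-stripped line
theorem pvCond_iff (line : String) (pat : List Char) :
    (PySem.Chars.findFrom line.toList pat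
        (((tirshaker_returnblanksatstart line).toList.length : Int)) =
      ((tirshaker_returnblanksatstart line).toList.length : Int))
      ↔ pat <+: pvStripped line.toList := by
  rw [pvLbl_eq]
  set k := (line.toList.takeWhile (· == ' ')).length with hk
  rw [PySem.Chars.findFrom_natCast _ _ k (pvLbl_le line), pvDrop_lbl]
  by_cases h : PySem.Chars.find (pvStripped line.toList) pat = -1
  · simp only [h]
    constructor
    · intro habs; exfalso; omega
    · intro hp
      exfalso
      have := (PySem.Chars.find_nonneg_iff (pvStripped line.toList) pat).2 hp.isInfix
      omega
  · rw [if_neg h]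
    have h0 : 0 ≤ PySem.Chars.find (pvStripped line.toList) pat := by
      have := PySem.Chars.neg_one_le_find (pvStripped line.toList) pat
      omega
    constructor
    · intro he
      have : PySem.Chars.find (pvStripped line.toList) pat = 0 := by omega
      exact (pvFind_eq_zero_iff _ _).1 this
    · intro hp
      have : PySem.Chars.find (pvStripped line.toList) pat = 0 := (pvFind_eq_zero_iff _ _).2 hp
      omega

-- range filtered on 'equals j' is the singleton [j]
theorem pvRange_filter_eq (n j : Nat) :
    (List.range n).filter (fun i => decide (i = j)) = if j < n then [j] else [] := by
  induction n with
  | zero => simp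
  | succ n ih =>
    rw [List.range_succ, List.filter_append, ih]
    by_cases h : j < n
    · have hne : ¬ n = j := by omega
      simp [h, Nat.lt_succ_of_lt h, hne]
    · by_cases h2 : j = n
      · subst h2; simp
      · have : ¬ j < n + 1 := by omega
        simp [h, this, Ne.symm h2]

theorem pvRange_filter_key (s key : List Char) (hk2 : key ≠ []) (hk3 : key.getLast? = some '=') :
    (List.range s.length).filter (fun i => (s.take (i + 1) == key) && decide (s[i]! = '='))
      = if key <+: s then [key.length - 1] else [] := by
  have hpt : ∀ i ∈ List.range s.length,
      ((s.take (i + 1) == key) && decide (s[i]! = '=')) = (decide (i = key.length - 1) && decide (key <+: s)) := by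
    intro i hi
    rw [List.mem_range] at hi
    by_cases hc : s.take (i + 1) = key ∧ s[i]! = '='
    · obtain ⟨h2, h1⟩ := hc
      have hklen : key.length = i + 1 := by
        rw [← h2, List.length_take]; omega
      have hpre : key <+: s := h2 ▸ List.take_prefix _ _
      simp [h1, h2, hpre, hklen]
    · rw [Bool.eq_iff_iff]
      simp only [Bool.and_eq_true, beq_iff_eq, decide_eq_true_eq]
      constructor
      · intro hab; exact absurd hab hc
      · rintro ⟨hij, hpre⟩
        exfalso
        have hkl : 1 ≤ key.length := by
          cases key with
          | nil => exact absurd rfl hk2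
          | cons a b => simp
        have hkle : key.length ≤ s.length := hpre.length_le
        have hi1 : i + 1 = key.length := by omega
        have htake : s.take (i + 1) = key := by
          rw [hi1]; exact (List.prefix_iff_eq_take.1 hpre).symm
        have hilt : i < key.length := by omega
        have hgl : key[i] = '=' := by
          have h2 : key[key.length - 1]? = some '=' := by
            rw [← List.getLast?_eq_getElem?, hk3]
          have h3 : key.length - 1 = i := by omega
          rw [h3, List.getElem?_eq_getElem hilt] at h2
          exact Option.some.inj h2
        have hgi : s[i]'(by omega) = '=' := by
          have := hpre.getElem (i := i) hilt
          rw [hgl] at this; exact this.symm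
        have : s[i]! = '=' := by
          rw [getElem!_pos s i (by omega)]; exact hgi
        exact hc ⟨htake, this⟩
  rw [List.filter_congr hpt]
  by_cases hp : key <+: s
  · have hkl : 1 ≤ key.length := by
      cases key with
      | nil => exact absurd rfl hk2
      | cons a b => simp
    have hlt : key.length - 1 < s.length := by
      have := hp.length_le; omega
    rw [if_pos hp]
    simp only [hp, decide_true, Bool.and_true]
    rw [pvRange_filter_eq s.length (key.length - 1), if_pos hlt]
  · simp [hp]

-- proof view of B's inner indexing loop: the (key, suffix) pairs one stripped line contributes
def pvPairsOf (s : List Char) : List (List Char × List Char) :=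
  if PySem.Chars.startswith s "ERR_".toList then
    ((List.range s.length).filter (fun i => decide (s[i]! = '='))).map
      (fun i => (s.take (i + 1), s.drop (i + 1)))
  else []

theorem pvPairs_match (s key : List Char)
    (hk1 : "ERR_".toList <+: key) (hk2 : key ≠ []) (hk3 : key.getLast? = some '=') :
    ((pvPairsOf s).filter (fun p => p.1 == key)).map (·.2) = pvMatch key s := by
  unfold pvPairsOf pvMatch
  by_cases hs : PySem.Chars.startswith s "ERR_".toList
  · rw [if_pos hs, List.filter_map, List.filter_filter]
    have hfc : (List.range s.length).filter
        (fun a => ((fun p => p.1 == key) ∘ fun i => (s.take (i + 1), s.drop (i + 1))) a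
          && decide (s[a]! = '='))
        = (List.range s.length).filter (fun i => (s.take (i + 1) == key) && decide (s[i]! = '=')) := rfl
    rw [hfc, pvRange_filter_key s key hk2 hk3]
    by_cases hp : key <+: s
    · have hkl : 1 ≤ key.length := by
        cases key with
        | nil => exact absurd rfl hk2
        | cons a b => simp
      rw [if_pos hp, if_pos hp]
      simp only [List.map_cons, List.map_nil]
      have : key.length - 1 + 1 = key.length := by omega
      rw [this]
    · rw [if_neg hp, if_neg hp]; simp
  · rw [if_neg hs]
    have hp : ¬ key <+: s := by
      intro hp
      exact hs ((PySem.Chars.startswith_iff _ _).2 (hk1.trans hp))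
    rw [if_neg hp]
    rfl

-- the dict lookup is exactly the per-line matches, in line order
theorem pvErrIndex_getD (lines : List String) (key : List Char)
    (hk1 : "ERR_".toList <+: key) (hk2 : key ≠ []) (hk3 : key.getLast? = some '=') :
    (pvErrIndex lines).getD key []
      = lines.flatMap (fun line => pvMatch key (pvStripped line.toList)) := by
  have hstep : pvErrIndex lines
      = (lines.flatMap (fun line => pvPairsOf (pvStripped line.toList))).foldl
          (fun d p => d.modify p.1 [] (· ++ [p.2])) PySem.Dict.empty := by
    rw [List.foldl_flatMap]
    unfold pvErrIndex
    apply PySem.List.foldl_congr_mem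
    intro d line _
    simp only
    unfold pvPairsOf
    by_cases hs : PySem.Chars.startswith (pvStripped line.toList) "ERR_".toList
    · rw [if_pos hs, if_pos hs, List.foldl_map,
        PySem.List.foldl_ite_eq_foldl_filter (p := fun i => (pvStripped line.toList)[i]! = '=')]
    · rw [if_neg hs, if_neg hs]; rfl
  rw [hstep, PySem.Dict.getD_foldl_modify_append, PySem.Dict.getD_empty,
    List.filter_flatMap, List.map_flatMap, List.nil_append]
  apply List.flatMap_congr
  intro line _
  exact pvPairs_match (pvStripped line.toList) key hk1 hk2 hk3

-- B's block for one parameter equals A's inner scan over the lines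
theorem pvParam_block_eq (lines : List String) (b : List String) (grnr : Int) (parameter : List Char) :
    (lines.foldl (fun b line =>
        let blankhere := tirshaker_returnblanksatstart line
        let lbl := blankhere.toList.length
        if PySem.Chars.findFrom line.toList ("ERR_".toList ++ parameter ++ "=".toList) (lbl : Int) = (lbl : Int) then
          b ++ ["GR_ERRB_" ++ PySem.Int.toStr grnr ++ "= 1"]
            ++ ["GR_ERRV_" ++ PySem.Int.toStr grnr ++ "="
                 ++ String.ofList (PySem.List.slice line.toList (some ((lbl : Int) + (("ERR_".toList ++ parameter ++ "=".toList).length : Int))) none)]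
        else b) b)
    = ((pvErrIndex lines).getD ("ERR_".toList ++ parameter ++ "=".toList) []).foldl (fun b v =>
        b ++ ["GR_ERRB_" ++ PySem.Int.toStr grnr ++ "= 1"]
          ++ ["GR_ERRV_" ++ PySem.Int.toStr grnr ++ "=" ++ String.ofList v]) b := by
  set key := "ERR_".toList ++ parameter ++ "=".toList with hkey
  set hfun := (fun v => ["GR_ERRB_" ++ PySem.Int.toStr grnr ++ "= 1"]
      ++ ["GR_ERRV_" ++ PySem.Int.toStr grnr ++ "=" ++ String.ofList v]) with hhfun
  have hk1 : "ERR_".toList <+: key := by rw [hkey]; exact (List.prefix_append _ _).trans (by rw [List.append_assoc])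
  have hk2 : key ≠ [] := by rw [hkey]; simp
  have hk3 : key.getLast? = some '=' := by
    rw [hkey, List.append_assoc]
    have : parameter ++ "=".toList = parameter ++ ['='] := rfl
    rw [this, ← List.append_assoc]
    exact List.getLast?_concat
  have hA : ∀ (b : List String) (line : String),
      (if PySem.Chars.findFrom line.toList key
            (((tirshaker_returnblanksatstart line).toList.length : Int)) =
          ((tirshaker_returnblanksatstart line).toList.length : Int) then
        b ++ ["GR_ERRB_" ++ PySem.Int.toStr grnr ++ "= 1"]
          ++ ["GR_ERRV_" ++ PySem.Int.toStr grnr ++ "="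
               ++ String.ofList (PySem.List.slice line.toList
                    (some (((tirshaker_returnblanksatstart line).toList.length : Int) + (key.length : Int))) none)]
      else b)
      = b ++ (pvMatch key (pvStripped line.toList)).flatMap hfun := by
    intro b line
    simp only [pvCond_iff]
    unfold pvMatch
    by_cases hp : key <+: pvStripped line.toList
    · rw [if_pos hp, if_pos hp]
      have hsl : PySem.List.slice line.toList
            (some (((tirshaker_returnblanksatstart line).toList.length : Int) + (key.length : Int))) none
          = (pvStripped line.toList).drop key.length := by
        rw [PySem.List.slice_from _ (by positivity)]
        have ht : ((((tirshaker_returnblanksatstart line).toList.length : Int) + (key.length : Int))).toNat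
            = (tirshaker_returnblanksatstart line).toList.length + key.length := by omega
        rw [ht, ← List.drop_drop, pvLbl_eq, pvDrop_lbl]
      rw [hsl, hhfun]
      simp [List.append_assoc]
    · rw [if_neg hp, if_neg hp]
      simp
  have hL : (lines.foldl (fun b line =>
      let blankhere := tirshaker_returnblanksatstart line
      let lbl := blankhere.toList.length
      if PySem.Chars.findFrom line.toList key (lbl : Int) = (lbl : Int) then
        b ++ ["GR_ERRB_" ++ PySem.Int.toStr grnr ++ "= 1"]
          ++ ["GR_ERRV_" ++ PySem.Int.toStr grnr ++ "="
               ++ String.ofList (PySem.List.slice line.toList (some ((lbl : Int) + (key.length : Int))) none)]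
      else b) b)
      = b ++ (lines.flatMap (fun line => pvMatch key (pvStripped line.toList))).flatMap hfun := by
    rw [List.flatMap_assoc]
    calc (lines.foldl _ b)
        = lines.foldl (fun b line => b ++ (pvMatch key (pvStripped line.toList)).flatMap hfun) b :=
          PySem.List.foldl_congr_mem _ _ _ _ (fun acc line _ => hA acc line)
      _ = b ++ lines.flatMap (fun line => (pvMatch key (pvStripped line.toList)).flatMap hfun) :=
          PySem.List.foldl_append_eq_flatMap _ lines b
  have hR : (((pvErrIndex lines).getD key []).foldl (fun b v =>
        b ++ ["GR_ERRB_" ++ PySem.Int.toStr grnr ++ "= 1"]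
          ++ ["GR_ERRV_" ++ PySem.Int.toStr grnr ++ "=" ++ String.ofList v]) b)
      = b ++ ((pvErrIndex lines).getD key []).flatMap hfun := by
    calc (((pvErrIndex lines).getD key []).foldl _ b)
        = ((pvErrIndex lines).getD key []).foldl (fun b v => b ++ hfun v) b := by
          apply PySem.List.foldl_congr_mem
          intro acc v _
          rw [hhfun, List.append_assoc]
      _ = b ++ ((pvErrIndex lines).getD key []).flatMap hfun :=
          PySem.List.foldl_append_eq_flatMap _ _ b
  rw [hL, hR, pvErrIndex_getD lines key hk1 hk2 hk3]

-- the whole block agrees (A carries (block, grnr); B enumerates)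
theorem pvBlock_eq (lines : List String) (params : List (List Char)) (b : List String) (k : Int) :
    (params.foldl (fun (st : List String × Int) parameter =>
      let grnr := st.2 + 1
      let b1 := st.1 ++ ["GR_COL_" ++ PySem.Int.toStr grnr ++ "= 1"]
                     ++ ["GR_LINES_" ++ PySem.Int.toStr grnr ++ "= 1"]
      let pat := "ERR_".toList ++ parameter ++ "=".toList
      let b2 := lines.foldl (fun b line =>
          let blankhere := tirshaker_returnblanksatstart line
          let lbl := blankhere.toList.length
          if PySem.Chars.findFrom line.toList pat (lbl : Int) = (lbl : Int) then
            b ++ ["GR_ERRB_" ++ PySem.Int.toStr grnr ++ "= 1"]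
              ++ ["GR_ERRV_" ++ PySem.Int.toStr grnr ++ "="
                   ++ String.ofList (PySem.List.slice line.toList (some ((lbl : Int) + (pat.length : Int))) none)]
          else b) b1
      (b2, grnr)) (b, k)).1
    = (PySem.List.enumerate params k).foldl (fun b ip =>
        let grnr := PySem.Int.toStr (ip.1 + 1)
        let b := b ++ ["GR_COL_" ++ grnr ++ "= 1"] ++ ["GR_LINES_" ++ grnr ++ "= 1"]
        ((pvErrIndex lines).getD ("ERR_".toList ++ ip.2 ++ "=".toList) []).foldl (fun b v =>
          b ++ ["GR_ERRB_" ++ grnr ++ "= 1"]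
            ++ ["GR_ERRV_" ++ grnr ++ "=" ++ String.ofList v]) b) b := by
  induction params generalizing b k with
  | nil => rfl
  | cons p ps ih =>
    have henum : PySem.List.enumerate (p :: ps) k = (k, p) :: PySem.List.enumerate ps (k + 1) := rfl
    rw [henum, List.foldl_cons, List.foldl_cons]
    simp only
    rw [← pvParam_block_eq lines _ (k + 1) p]
    exact ih _ (k + 1)

-- ===== VERDICT (by name: the statement is the Claim_ definition above) =====
theorem replaceforplot_lines_spec : Claim_equal_replaceforplot_lines := by
  intro lines gr_parms gr_device _
  unfold Spec_replaceforplot_lines replaceforplot_lines replaceforplot_lines_alt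
  simp only
  rw [pvBlock_eq lines]
  apply PySem.List.foldl_congr_mem
  intro acc line _
  simp only [pvCond_iff, PySem.Chars.startswith_iff]
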